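-- pv_equiv track=rewrite | github.com/Cobbleston/coding-projects | word-games/wordle.py | quintetto_ok
-- ===== SOURCE A (Python) =====
-- def senza_doppie(w):
--     res = True
--     i = 0
--     while (i < len(w) and res):
--         if w[i] in w[:i]+w[i+1:]:
--             res = False
--         i += 1
--     return res
--
-- def quintetto_ok(l):
--     a = ""
--     for w in l:
--         a += w
--     if senza_doppie(a):
--         return True
--     else:
--         return False
-- ===== SOURCE B (Python) =====
-- def _no_adjacent_dup(s):
--     for i in range(1, len(s)):
--         if s[i] == s[i - 1]:
--             return False
--     return True
--
-- def quintetto_ok(l):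
--     return _no_adjacent_dup(sorted("".join(l)))
-- ===== Notes on version B (the rewrite author's own statement) =====
-- stated objective: alternative
-- what changed: replaces the per-position rescan of the whole concatenation (slice copies and substring search at every index) with sort-then-adjacent-compare in a single pass
import Mathlib
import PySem

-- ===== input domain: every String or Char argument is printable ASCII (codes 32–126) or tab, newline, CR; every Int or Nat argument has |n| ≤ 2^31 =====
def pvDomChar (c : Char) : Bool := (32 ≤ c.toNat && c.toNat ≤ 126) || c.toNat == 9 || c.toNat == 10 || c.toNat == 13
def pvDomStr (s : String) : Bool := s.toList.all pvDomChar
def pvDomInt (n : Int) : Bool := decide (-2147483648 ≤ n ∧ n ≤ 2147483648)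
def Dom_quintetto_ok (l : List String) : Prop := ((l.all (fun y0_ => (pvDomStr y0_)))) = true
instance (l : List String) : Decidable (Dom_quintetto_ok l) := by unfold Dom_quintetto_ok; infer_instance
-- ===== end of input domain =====

-- B replaces A's per-position rescan of the concatenation with sort-then-adjacent-compare (objective: alternative).

-- ===== PORT A =====
-- strings are ported as List Char throughout (String append/length are kernel-opaque);
-- the slices w[:i] and w[i+1:] have nonnegative bounds here, so take/drop is exact,
-- and `w[i] in <string>` with a 1-character needle is exactly membership of that character.
def senzaLoop (cs : List Char) (i : Nat) (res : Bool) : Bool :=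
  if h : i < cs.length ∧ res = true then
    senzaLoop cs (i + 1) (if cs[i]'h.1 ∈ cs.take i ++ cs.drop (i + 1) then false else res)
  else res
termination_by cs.length - i

def senza_doppie (cs : List Char) : Bool := senzaLoop cs 0 true

def quintetto_ok (l : List String) : Bool :=
  let a := l.foldl (fun acc w => acc ++ w.toList) []
  if senza_doppie a then true else false

-- ===== PORT B =====
-- the for-loop of _no_adjacent_dup compares each element with its predecessor: structural recursion on the sorted list
def noAdjDup : List Char → Bool
  | a :: b :: rest => if a == b then false else noAdjDup (b :: rest)
  | _ => true

def quintetto_ok_alt (l : List String) : Bool :=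
  noAdjDup (PySem.List.sorted (PySem.Chars.join [] (l.map String.toList)) (fun c => c) false)

-- ===== PRECONDITION & SPEC =====
def Spec_quintetto_ok (l : List String) (out : Bool) : Prop := out = quintetto_ok_alt l
instance (l : List String) (out : Bool) : Decidable (Spec_quintetto_ok l out) := by unfold Spec_quintetto_ok; infer_instance

-- ===== CLAIM (what is proved, stated in full; the proofs are below) =====
def Claim_equal_quintetto_ok : Prop := ∀ (l : List String), Dom_quintetto_ok l → Spec_quintetto_ok l (quintetto_ok l)

-- ===== LEMMAS AND PROOFS =====

lemma join_nil_eq_flatten (l : List (List Char)) : PySem.Chars.join [] l = l.flatten := by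
  induction l with
  | nil => rfl
  | cons x xs ih =>
    cases xs with
    | nil => simp [PySem.Chars.join, List.intercalate]
    | cons y ys => rw [PySem.Chars.join_cons_cons]; simp_all [PySem.Chars.join]

lemma foldl_append_toList (l : List String) (acc : List Char) :
    l.foldl (fun acc w => acc ++ w.toList) acc = acc ++ (l.map String.toList).flatten := by
  induction l generalizing acc with
  | nil => simp
  | cons x xs ih => simp [List.foldl_cons, ih]

lemma nodup_iff_getElem_lt (cs : List Char) :
    cs.Nodup ↔ ∀ i j (_ : i < cs.length) (hj : j < cs.length), i < j → cs[i] ≠ cs[j] := by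
  rw [List.nodup_iff_getElem?_ne_getElem?]
  constructor
  · intro h i j hi hj hij
    have := h i j hij hj
    simp_all
  · intro h i j hij hj
    have := h i j (by omega) hj hij
    simpa [List.getElem?_eq_getElem, hj, Nat.lt_trans hij hj] using this

lemma mem_take_drop_iff (cs : List Char) (j : Nat) (hj : j < cs.length) (x : Char) :
    x ∈ cs.take j ++ cs.drop (j + 1) ↔ ∃ k, ∃ _ : k < cs.length, k ≠ j ∧ cs[k] = x := by
  simp only [List.mem_append, List.mem_take_iff_getElem, List.mem_drop_iff_getElem]
  constructor
  · rintro (⟨k, hk, e⟩ | ⟨k, hk, e⟩)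
    · exact ⟨k, by omega, by omega, e⟩
    · exact ⟨j + 1 + k, by omega, by omega, by simpa using e⟩
  · rintro ⟨k, hk, hkj, e⟩
    rcases Nat.lt_or_ge k j with h | h
    · exact Or.inl ⟨k, by omega, e⟩
    · exact Or.inr ⟨k - (j + 1), by omega, by rw [← e]; congr 1; omega⟩

lemma nodup_iff_no_dup_at (cs : List Char) :
    cs.Nodup ↔ ∀ j (hj : j < cs.length), cs[j] ∉ cs.take j ++ cs.drop (j + 1) := by
  rw [nodup_iff_getElem_lt]
  constructor
  · intro h j hj hm
    rw [mem_take_drop_iff cs j hj] at hm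
    rcases hm with ⟨k, hk, hkj, e⟩
    rcases Nat.lt_or_ge k j with hlt | hge
    · exact h k j hk hj hlt e
    · exact h j k hj hk (by omega) e.symm
  · intro h i j hi hj hij e
    exact h j hj ((mem_take_drop_iff cs j hj _).2 ⟨i, hi, by omega, e⟩)

lemma senzaLoop_false (cs : List Char) (i : Nat) : senzaLoop cs i false = false := by
  unfold senzaLoop; simp

lemma senzaLoop_true_iff (cs : List Char) (i : Nat) :
    senzaLoop cs i true = true ↔
      ∀ j (hj : j < cs.length), i ≤ j → cs[j] ∉ cs.take j ++ cs.drop (j + 1) := by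
  by_cases hlen : i < cs.length
  · rw [senzaLoop]
    simp only [hlen, true_and, dite_true]
    by_cases hmem : cs[i]'hlen ∈ cs.take i ++ cs.drop (i + 1)
    · rw [if_pos hmem, senzaLoop_false]
      simp only [Bool.false_eq_true, false_iff]
      push Not
      exact ⟨i, hlen, le_refl i, hmem⟩
    · rw [if_neg hmem, senzaLoop_true_iff cs (i + 1)]
      constructor
      · intro h j hj hij
        rcases Nat.eq_or_lt_of_le hij with rfl | hlt
        · exact hmem
        · exact h j hj hlt
      · intro h j hj hij
        exact h j hj (by omega)
  · rw [senzaLoop]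
    simp only [hlen, false_and, dif_neg, not_false_eq_true]
    constructor
    · intro _ j hj hij
      omega
    · intro _; trivial
termination_by cs.length - i

lemma senza_doppie_iff_nodup (cs : List Char) : senza_doppie cs = true ↔ cs.Nodup := by
  rw [senza_doppie, senzaLoop_true_iff, nodup_iff_no_dup_at]
  exact ⟨fun h j hj => h j hj (Nat.zero_le j), fun h j hj _ => h j hj⟩

lemma noAdjDup_iff_chain' (xs : List Char) : noAdjDup xs = true ↔ xs.IsChain (· ≠ ·) := by
  induction xs with
  | nil => simp [noAdjDup]
  | cons a tail ih =>
    cases tail with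
    | nil => simp [noAdjDup]
    | cons b rest =>
      rw [noAdjDup, List.isChain_cons_cons]
      split_ifs with hab
      · simp_all
      · rw [ih]
        have : a ≠ b := by simpa using hab
        tauto

lemma ischain_ne_iff_nodup_of_sorted (ys : List Char) (hs : ys.Pairwise (· ≤ ·)) :
    ys.IsChain (· ≠ ·) ↔ ys.Nodup := by
  constructor
  · intro hc
    have hle : ys.IsChain (· ≤ ·) := hs.isChain
    have hlt : ys.IsChain (· < ·) := by
      induction ys with
      | nil => simp
      | cons a tail ih =>
        cases tail with
        | nil => simp
        | cons b rest =>
          rw [List.isChain_cons_cons] at hc hle ⊢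
          exact ⟨lt_of_le_of_ne hle.1 hc.1,
            ih (List.Pairwise.of_cons hs) hc.2 hle.2⟩
    have : ys.Pairwise (· < ·) := List.isChain_iff_pairwise.mp hlt
    exact this.imp ne_of_lt
  · intro hn
    exact List.Pairwise.isChain hn

lemma alt_iff_nodup (cs : List Char) :
    noAdjDup (PySem.List.sorted cs (fun c => c) false) = true ↔ cs.Nodup := by
  rw [noAdjDup_iff_chain',
    ischain_ne_iff_nodup_of_sorted _ (by simpa using PySem.List.sorted_pairwise cs (fun c => c))]
  exact (PySem.List.sorted_perm cs (fun c => c) false).nodup_iff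

-- ===== VERDICT (by name: the statement is the Claim_ definition above) =====
theorem quintetto_ok_spec : Claim_equal_quintetto_ok := by
  intro l _
  unfold Spec_quintetto_ok quintetto_ok quintetto_ok_alt
  rw [join_nil_eq_flatten, foldl_append_toList]
  simp only [List.nil_append]
  rw [Bool.eq_iff_iff]
  have := senza_doppie_iff_nodup ((l.map String.toList).flatten)
  have := alt_iff_nodup ((l.map String.toList).flatten)
  split_ifs with h
  · simp_all
  · simp_all
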